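-- pv_equiv track=rewrite | github.com/whiteavian/hkrnk | strings.py | contiguous_substring_weights
-- ===== SOURCE A (Python) =====
-- def contiguous_substring_weights(string):
--     contig_substr_weights = set()
--
--     previous = None
--
--     for letter in string:
--         if letter == previous:
--             weight += ord(letter) - 96
--         else:
--             previous = letter
--             weight = ord(letter) - 96
--
--         contig_substr_weights.add(weight)
--
--     return contig_substr_weights
-- ===== SOURCE B (Python) =====
-- def contiguous_substring_weights(string):
--     weights = set()
--     i = 0
--     n = len(string)
--     while i < n:
--         j = i + 1
--         while j < n and string[j] == string[i]:
--             j += 1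
--         v = ord(string[i]) - 96
--         for k in range(1, j - i + 1):
--             weights.add(v * k)
--         i = j
--     return weights
-- ===== Notes on version B (the rewrite author's own statement) =====
-- stated objective: alternative
-- what changed: Replaces the single stateful letter-by-letter loop (carrying previous/weight across iterations) with a run-first decomposition: scan each maximal run of equal letters, then emit its prefix weights as the multiples v*1..v*L of the unit weight.
import Mathlib
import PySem

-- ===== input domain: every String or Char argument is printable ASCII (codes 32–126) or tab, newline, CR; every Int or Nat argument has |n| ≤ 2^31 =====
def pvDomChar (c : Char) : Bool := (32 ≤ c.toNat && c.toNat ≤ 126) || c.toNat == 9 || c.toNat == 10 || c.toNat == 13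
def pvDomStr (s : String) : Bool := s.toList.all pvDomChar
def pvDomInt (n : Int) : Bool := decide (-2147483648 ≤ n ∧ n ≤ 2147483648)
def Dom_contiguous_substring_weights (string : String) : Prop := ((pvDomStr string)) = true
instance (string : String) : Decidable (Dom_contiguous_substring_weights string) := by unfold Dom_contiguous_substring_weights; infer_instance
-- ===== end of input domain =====

-- B is an alternative run-first decomposition of the same O(n) task (no speed claim).

-- ===== PORT A =====
-- A's loop state: (previous, weight, set); first iteration always takes the else branch
-- (previous starts as None, which never equals a character).
def cswStepA (st : Option Char × Int × PySem.Set Int) (letter : Char) : Option Char × Int × PySem.Set Int :=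
  if some letter == st.1 then
    let w := st.2.1 + ((letter.toNat : Int) - 96)
    (st.1, w, PySem.Set.add st.2.2 w)
  else
    let w := (letter.toNat : Int) - 96
    (some letter, w, PySem.Set.add st.2.2 w)

def contiguous_substring_weights (string : String) : List Int :=
  (string.toList.foldl cswStepA (none, (0 : Int), PySem.Set.empty)).2.2

-- ===== PORT B =====
-- the inner while loop of B: count how many further copies of c lead cs, and return the rest
def cswRun (c : Char) : List Char → Nat × List Char
  | [] => (0, [])
  | x :: xs =>
    if x = c then
      let r := cswRun c xs
      (r.1 + 1, r.2)
    else (0, x :: xs)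

theorem cswRun_snd_le (c : Char) : ∀ cs : List Char, (cswRun c cs).2.length ≤ cs.length
  | [] => le_refl _
  | x :: xs => by
    simp only [cswRun]
    split
    · exact le_trans (cswRun_snd_le c xs) (Nat.le_succ _)
    · simp

-- the outer while loop of B
def cswGo : List Char → PySem.Set Int → PySem.Set Int
  | [], s => s
  | c :: cs, s =>
    let r := cswRun c cs
    let v : Int := (c.toNat : Int) - 96
    let s' := (PySem.List.pyRange 1 ((r.1 : Int) + 2) 1).foldl
      (fun acc k => PySem.Set.add acc (v * k)) s
    cswGo r.2 s'
termination_by cs => cs.length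
decreasing_by
  exact Nat.lt_succ_of_le (cswRun_snd_le c cs)

def contiguous_substring_weights_alt (string : String) : List Int :=
  cswGo string.toList PySem.Set.empty

-- ===== PRECONDITION & SPEC =====
def Spec_contiguous_substring_weights (string : String) (out : List Int) : Prop := out = contiguous_substring_weights_alt string
instance (string : String) (out : List Int) : Decidable (Spec_contiguous_substring_weights string out) := by unfold Spec_contiguous_substring_weights; infer_instance

-- ===== CLAIM (what is proved, stated in full; the proofs are below) =====
def Claim_equal_contiguous_substring_weights : Prop := ∀ (string : String), Dom_contiguous_substring_weights string → Spec_contiguous_substring_weights string (contiguous_substring_weights string)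

-- ===== LEMMAS AND PROOFS =====

theorem cswRun_spec (c : Char) : ∀ cs : List Char,
    cs = List.replicate (cswRun c cs).1 c ++ (cswRun c cs).2 ∧
      (cswRun c cs).2.head? ≠ some c
  | [] => by simp [cswRun]
  | x :: xs => by
    by_cases h : x = c
    · obtain ⟨h1, h2⟩ := cswRun_spec c xs
      subst h
      simp only [cswRun, reduceIte]
      refine ⟨?_, h2⟩
      conv_lhs => rw [h1]
      simp [List.replicate_succ]
    · simp [cswRun, h]

-- A's fold through a block of n copies of c, starting mid-run with weight w
theorem fold_rep (c : Char) (rest : List Char) :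
    ∀ (n : ℕ) (w : Int) (s : PySem.Set Int),
      List.foldl cswStepA (some c, w, s) (List.replicate n c ++ rest) =
        List.foldl cswStepA
          (some c, w + n * ((c.toNat : Int) - 96),
            (List.range n).foldl
              (fun (acc : PySem.Set Int) (i : ℕ) =>
                PySem.Set.add acc (w + ((i : Int) + 1) * ((c.toNat : Int) - 96))) s)
          rest
  | 0, w, s => by simp
  | n + 1, w, s => by
    rw [List.replicate_succ]
    simp only [List.cons_append, List.foldl_cons, cswStepA, beq_self_eq_true, if_true]
    rw [fold_rep c rest n (w + ((c.toNat : Int) - 96)) _]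
    congr 1
    simp only [Prod.mk.injEq, true_and]
    refine ⟨by push_cast; ring, ?_⟩
    rw [List.range_succ_eq_map, List.foldl_cons, List.foldl_map]
    congr 1
    · funext acc i; congr 1; push_cast; ring
    · congr 1; ring

theorem go_eq : ∀ cs : List Char, ∀ (prev : Option Char) (w : Int) (s : PySem.Set Int),
    (∀ c, prev = some c → cs.head? ≠ some c) →
    (List.foldl cswStepA (prev, w, s) cs).2.2 = cswGo cs s
  | [], _, _, s, _ => by
    show s = cswGo [] s
    rw [cswGo]
  | c :: cs, prev, w, s, h => by
    have hne : (some c == prev) = false := by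
      cases prev with
      | none => rfl
      | some d =>
        simp only [beq_eq_false_iff_ne, ne_eq, Option.some.injEq]
        intro hdc
        exact h d rfl (by simp [hdc])
    obtain ⟨h1, h2⟩ := cswRun_spec c cs
    rw [List.foldl_cons]
    simp only [cswStepA, hne]
    simp only [Bool.false_eq_true, if_false]
    conv_lhs => rw [h1]
    rw [fold_rep]
    rw [go_eq (cswRun c cs).2 (some c) _ _
        (by intro d hd; rw [Option.some.injEq] at hd; subst hd; exact h2)]
    simp only [cswGo]
    congr 1
    rw [PySem.List.pyRange_one_cons (by omega)]
    rw [List.foldl_cons]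
    have hr : PySem.List.pyRange (1 + 1) (((cswRun c cs).1 : Int) + 2) 1 =
        (List.range (cswRun c cs).1).map (fun k : ℕ => 2 + (k : Int)) := by
      rw [PySem.List.pyRange_one]
      have h3 : ((((cswRun c cs).1 : Int) + 2) - (1 + 1)).toNat = (cswRun c cs).1 := by omega
      rw [h3]
      norm_num
    rw [hr, List.foldl_map]
    congr 1
    · funext acc i
      congr 1
      ring
    · congr 1
      ring
termination_by cs => cs.length
decreasing_by
  simpa using Nat.lt_succ_of_le (cswRun_snd_le c cs)

-- ===== VERDICT (by name: the statement is the Claim_ definition above) =====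
theorem contiguous_substring_weights_spec : Claim_equal_contiguous_substring_weights := by
  intro string _
  unfold Spec_contiguous_substring_weights contiguous_substring_weights contiguous_substring_weights_alt
  exact go_eq string.toList none 0 PySem.Set.empty (by intro c h; cases h)
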